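-- pv_equiv track=rewrite | github.com/sammchardy/python-binance | exchanges/binance/klines.py | substract_arrays
-- ===== SOURCE A (Python) =====
-- from itertools import zip_longest
--
-- def substract_arrays(arr1, arr2):
--     merged = reversed(list(zip_longest(reversed(arr1), reversed(arr2), fillvalue=0)))
--     merged = list(merged)
--
--     def substract(a):
--         if a[1] == 0:
--             return 0
--         return a[0] - a[1]
--
--     return [substract(a) for a in merged]
-- ===== SOURCE B (Python) =====
-- def substract_arrays(arr1, arr2):
--     out = []
--     i = len(arr1)
--     j = len(arr2)
--     while i > 0 and j > 0:
--         i -= 1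
--         j -= 1
--         b = arr2[j]
--         out.append(0 if b == 0 else arr1[i] - b)
--     while j > 0:
--         j -= 1
--         b = arr2[j]
--         out.append(0 if b == 0 else -b)
--     while i > 0:
--         i -= 1
--         out.append(0)
--     out.reverse()
--     return out
-- ===== Notes on version B (the rewrite author's own statement) =====
-- stated objective: alternative
-- what changed: Replaces A's reversed/zip_longest/re-reverse pipeline and mapped helper with a two-pointer scan from the tails: three staged while-loops (overlap, arr2 overhang, arr1 overhang) append results back-to-front with no padding or pairing, and one final reverse restores order.
import Mathlib
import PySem

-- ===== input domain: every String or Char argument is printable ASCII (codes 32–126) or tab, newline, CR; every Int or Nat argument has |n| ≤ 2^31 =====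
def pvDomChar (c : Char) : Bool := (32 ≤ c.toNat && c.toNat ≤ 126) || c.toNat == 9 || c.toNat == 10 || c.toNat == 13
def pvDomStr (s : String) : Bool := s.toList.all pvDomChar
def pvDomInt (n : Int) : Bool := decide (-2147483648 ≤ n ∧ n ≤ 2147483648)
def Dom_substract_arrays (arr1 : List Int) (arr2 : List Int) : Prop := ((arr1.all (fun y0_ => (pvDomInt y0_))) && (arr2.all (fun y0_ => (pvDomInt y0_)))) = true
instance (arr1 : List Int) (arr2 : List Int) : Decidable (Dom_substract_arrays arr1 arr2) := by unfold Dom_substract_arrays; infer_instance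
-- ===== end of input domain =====

-- B replaces A's reversed/zip_longest/re-reverse pipeline with a tail-to-head two-pointer scan in three staged loops plus one final reverse (objective: alternative).


-- ===== PORT A =====
-- hand port of itertools.zip_longest(xs, ys, fillvalue=0); exact for two int lists
def pyZipLongest : List Int → List Int → List (Int × Int)
  | [], [] => []
  | x :: xs, [] => (x, 0) :: pyZipLongest xs []
  | [], y :: ys => (0, y) :: pyZipLongest [] ys
  | x :: xs, y :: ys => (x, y) :: pyZipLongest xs ys

-- A's inner helper 'substract'
def pySubstract (a : Int × Int) : Int := if a.2 = 0 then 0 else a.1 - a.2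

def substract_arrays (arr1 : List Int) (arr2 : List Int) : List Int :=
  let merged := ((pyZipLongest arr1.reverse arr2.reverse).reverse)
  merged.map pySubstract

-- ===== PORT B =====
-- the three while-loops of Source B, recursion on the decremented counters; indices are in range
-- (0 ≤ i-1 < len when i > 0), so arr[i] is getD i 0; 'out.append x' is 'out ++ [x]'
def bWhile1 (arr1 arr2 : List Int) : Nat → Nat → List Int → Nat × Nat × List Int
  | i + 1, j + 1, out =>
      bWhile1 arr1 arr2 i j
        (out ++ [if arr2.getD j 0 = 0 then 0 else arr1.getD i 0 - arr2.getD j 0])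
  | i, j, out => (i, j, out)

def bWhile2 (arr2 : List Int) : Nat → List Int → List Int
  | j + 1, out => bWhile2 arr2 j (out ++ [if arr2.getD j 0 = 0 then 0 else -(arr2.getD j 0)])
  | 0, out => out

def bWhile3 : Nat → List Int → List Int
  | i + 1, out => bWhile3 i (out ++ [0])
  | 0, out => out

def substract_arrays_alt (arr1 : List Int) (arr2 : List Int) : List Int :=
  let r := bWhile1 arr1 arr2 arr1.length arr2.length []
  (bWhile3 r.1 (bWhile2 arr2 r.2.1 r.2.2)).reverse

-- ===== PRECONDITION & SPEC =====
def Spec_substract_arrays (arr1 : List Int) (arr2 : List Int) (out : List Int) : Prop := out = substract_arrays_alt arr1 arr2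
instance (arr1 : List Int) (arr2 : List Int) (out : List Int) : Decidable (Spec_substract_arrays arr1 arr2 out) := by unfold Spec_substract_arrays; infer_instance

-- ===== CLAIM (what is proved, stated in full; the proofs are below) =====
def Claim_equal_substract_arrays : Prop := ∀ (arr1 : List Int) (arr2 : List Int), Dom_substract_arrays arr1 arr2 → Spec_substract_arrays arr1 arr2 (substract_arrays arr1 arr2)

-- ===== LEMMAS AND PROOFS =====

-- snoc-step laws for A (a final pair of elements contributes one final output element)
theorem A_snoc_both (xs ys : List Int) (x y : Int) :
    substract_arrays (xs ++ [x]) (ys ++ [y])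
      = substract_arrays xs ys ++ [if y = 0 then 0 else x - y] := by
  simp [substract_arrays, pyZipLongest, pySubstract]

theorem A_snoc_right (ys : List Int) (y : Int) :
    substract_arrays [] (ys ++ [y])
      = substract_arrays [] ys ++ [if y = 0 then 0 else -y] := by
  simp [substract_arrays, pyZipLongest, pySubstract]

theorem A_snoc_left (xs : List Int) (x : Int) :
    substract_arrays (xs ++ [x]) [] = substract_arrays xs [] ++ [0] := by
  simp [substract_arrays, pyZipLongest, pySubstract]

-- each loop only appends: the accumulator factors out
theorem bWhile1_out (arr1 arr2 : List Int) (i j : Nat) (out : List Int) :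
    bWhile1 arr1 arr2 i j out
      = ((bWhile1 arr1 arr2 i j []).1, (bWhile1 arr1 arr2 i j []).2.1,
         out ++ (bWhile1 arr1 arr2 i j []).2.2) := by
  induction i generalizing j out with
  | zero => cases j <;> simp [bWhile1]
  | succ i ih =>
    cases j with
    | zero => simp [bWhile1]
    | succ j =>
      simp only [bWhile1]
      rw [ih, ih _ ([] ++ _)]
      simp

theorem bWhile2_out (arr2 : List Int) (j : Nat) (out : List Int) :
    bWhile2 arr2 j out = out ++ bWhile2 arr2 j [] := by
  induction j generalizing out with
  | zero => simp [bWhile2]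
  | succ j ih =>
    simp only [bWhile2]
    rw [ih, ih ([] ++ _)]
    simp

theorem bWhile3_out (i : Nat) (out : List Int) :
    bWhile3 i out = out ++ bWhile3 i [] := by
  induction i generalizing out with
  | zero => simp [bWhile3]
  | succ i ih =>
    simp only [bWhile3]
    rw [ih, ih ([] ++ _)]
    simp

-- phase 2 alone computes A on the leading slice of arr2 (reversed)
theorem bWhile2_spec (arr2 : List Int) (j : Nat) (hj : j ≤ arr2.length) :
    (bWhile2 arr2 j []).reverse = substract_arrays [] (arr2.take j) := by
  induction j with
  | zero => simp [bWhile2, substract_arrays, pyZipLongest]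
  | succ j ih =>
    have hj' : j ≤ arr2.length := by omega
    have hlt : j < arr2.length := by omega
    have htake : arr2.take (j + 1) = arr2.take j ++ [arr2.getD j 0] := by
      rw [List.take_add_one, List.getElem?_eq_getElem hlt, List.getD_eq_getElem arr2 0 hlt]
      simp
    simp only [bWhile2]
    rw [bWhile2_out, htake, A_snoc_right]
    simp [ih hj']

-- phase 3 alone yields zeros for the arr1 overhang
theorem bWhile3_spec (arr1 : List Int) (i : Nat) (hi : i ≤ arr1.length) :
    (bWhile3 i []).reverse = substract_arrays (arr1.take i) [] := by
  induction i with
  | zero => simp [bWhile3, substract_arrays, pyZipLongest]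
  | succ i ih =>
    have hi' : i ≤ arr1.length := by omega
    have hlt : i < arr1.length := by omega
    have htake : arr1.take (i + 1) = arr1.take i ++ [arr1.getD i 0] := by
      rw [List.take_add_one, List.getElem?_eq_getElem hlt, List.getD_eq_getElem arr1 0 hlt]
      simp
    simp only [bWhile3]
    rw [bWhile3_out, htake, A_snoc_left]
    simp [ih hi']

-- the whole pipeline computes A on the leading slices
theorem pipeline_spec (arr1 arr2 : List Int) (i j : Nat)
    (hi : i ≤ arr1.length) (hj : j ≤ arr2.length) :
    (bWhile3 (bWhile1 arr1 arr2 i j []).1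
      (bWhile2 arr2 (bWhile1 arr1 arr2 i j []).2.1 (bWhile1 arr1 arr2 i j []).2.2)).reverse
      = substract_arrays (arr1.take i) (arr2.take j) := by
  induction i generalizing j with
  | zero =>
    cases j with
    | zero =>
      simp [bWhile1, bWhile2, bWhile3, substract_arrays, pyZipLongest]
    | succ j =>
      simp only [bWhile1, bWhile3, List.take_zero]
      exact bWhile2_spec arr2 (j + 1) hj
  | succ i ih =>
    cases j with
    | zero =>
      simp only [bWhile1, bWhile2, List.take_zero]
      exact bWhile3_spec arr1 (i + 1) hi
    | succ j =>
      have hi' : i ≤ arr1.length := by omega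
      have hj' : j ≤ arr2.length := by omega
      have hlt1 : i < arr1.length := by omega
      have hlt2 : j < arr2.length := by omega
      have ht1 : arr1.take (i + 1) = arr1.take i ++ [arr1.getD i 0] := by
        rw [List.take_add_one, List.getElem?_eq_getElem hlt1, List.getD_eq_getElem arr1 0 hlt1]
        simp
      have ht2 : arr2.take (j + 1) = arr2.take j ++ [arr2.getD j 0] := by
        rw [List.take_add_one, List.getElem?_eq_getElem hlt2, List.getD_eq_getElem arr2 0 hlt2]
        simp
      simp only [bWhile1]
      rw [bWhile1_out, bWhile2_out, bWhile3_out, ht1, ht2, A_snoc_both]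
      have := ih j hi' hj'
      rw [bWhile2_out, bWhile3_out] at this
      simp only [List.nil_append] at this ⊢
      simp [← this]

theorem substract_arrays_spec' (arr1 arr2 : List Int) :
    substract_arrays arr1 arr2 = substract_arrays_alt arr1 arr2 := by
  unfold substract_arrays_alt
  rw [pipeline_spec arr1 arr2 arr1.length arr2.length le_rfl le_rfl]
  simp

-- ===== VERDICT (by name: the statement is the Claim_ definition above) =====
theorem substract_arrays_spec : Claim_equal_substract_arrays := by
  intro arr1 arr2 _
  exact substract_arrays_spec' arr1 arr2
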